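-- pv_equiv track=rewrite | github.com/Tiedye/CCC | 2010S3.py | hydrants_required
-- ===== SOURCE A (Python) =====
-- def hydrants_required(hl, l):
--     # hl is a list of houses, l is the maximum length of hose available
--     ml = 0  # minimum length of hose required
--     hc = 1  # hydrant count
--     cs = hl[0]  # current starting house for the group
--     for h in hl[1:]:
--         # loop through each house, if it is close enough to the current starting house, than it can be covered by the
--         # same hose as that house
--         if h - cs < l:
--             ml = max(ml, h - cs)
--             # keep track or the amount of hose required to cover the houses, its the longest hose required in the set
--         else:
--             # if the house is too far away, make it the beginning of the next group of houses and increment the hydrant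
--             # count
--             cs = h
--             hc += 1
--     return hc, ml
-- ===== SOURCE B (Python) =====
-- def hydrants_required(hl, l):
--     # Build the explicit list of hydrant groups, then aggregate.
--     groups = []
--     cur = [hl[0]]
--     for h in hl[1:]:
--         if h - cur[0] >= l:
--             groups.append(cur)
--             cur = [h]
--         else:
--             cur.append(h)
--     groups.append(cur)
--     return len(groups), max(max(g) - g[0] for g in groups)
-- ===== Notes on version B (the rewrite author's own statement) =====
-- stated objective: alternative
-- what changed: B materialises the explicit list of hydrant groups in one pass and then aggregates (count = number of groups, hose length = max over groups of max(group) - start), instead of A's fused single loop carrying running ml/hc/cs counters.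
-- outside the precondition, e.g. on hydrants_required([], 5): A raises IndexError, B raises IndexError
import Mathlib
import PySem

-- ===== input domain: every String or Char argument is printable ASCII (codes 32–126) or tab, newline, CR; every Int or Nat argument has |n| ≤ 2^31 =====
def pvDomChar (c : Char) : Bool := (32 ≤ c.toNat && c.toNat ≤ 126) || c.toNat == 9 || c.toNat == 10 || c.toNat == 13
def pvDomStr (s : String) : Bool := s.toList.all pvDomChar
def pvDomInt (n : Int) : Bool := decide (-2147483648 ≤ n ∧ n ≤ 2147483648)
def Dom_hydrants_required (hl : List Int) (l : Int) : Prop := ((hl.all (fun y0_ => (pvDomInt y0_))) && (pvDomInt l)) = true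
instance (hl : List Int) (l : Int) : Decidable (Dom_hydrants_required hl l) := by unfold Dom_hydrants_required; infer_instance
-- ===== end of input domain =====

-- B builds the explicit list of hydrant groups in one pass and aggregates afterwards; A fuses running counters into a single loop.

-- ===== PORT A =====
-- fold state (ml, hc, cs); hl[0] raises IndexError on [] (that input is excluded by Pre_), the [] branch value is never claimed
def hydrants_required (hl : List Int) (l : Int) : Int × Int :=
  match hl with
  | [] => (0, 0)
  | c :: rest =>
    let st := rest.foldl (fun (s : Int × Int × Int) h =>
      if h - s.2.2 < l then (max s.1 (h - s.2.2), s.2.1, s.2.2)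
      else (s.1, s.2.1 + 1, h)) (0, 1, c)
    (st.2.1, st.1)

-- ===== PORT B =====
-- fold state (closed groups, current group); the current group is never empty, so headD 0 is Python's cur[0]
def hydrants_required_alt (hl : List Int) (l : Int) : Int × Int :=
  match hl with
  | [] => (0, 0)
  | c :: rest =>
    let st := rest.foldl (fun (s : List (List Int) × List Int) h =>
      if h - s.2.headD 0 ≥ l then (s.1 ++ [s.2], [h])
      else (s.1, s.2 ++ [h])) (([] : List (List Int)), [c])
    let groups := st.1 ++ [st.2]
    ((groups.length : Int),
     (PySem.List.max? (groups.map (fun g =>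
        (PySem.List.max? g (fun y => y)).getD 0 - g.headD 0)) (fun y => y)).getD 0)

-- ===== PRECONDITION & SPEC =====
-- Pre_ excludes only the empty list, on which Python A raises IndexError at hl[0]; B raises the same exception there.
def Pre_hydrants_required (hl : List Int) (l : Int) : Prop := hl ≠ []
instance (hl : List Int) (l : Int) : Decidable (Pre_hydrants_required hl l) := by unfold Pre_hydrants_required; infer_instance
def pvWitness_hydrants_required : List Int × Int := ([0, 3, 9, 10], 5)

def Spec_hydrants_required (hl : List Int) (l : Int) (out : Int × Int) : Prop := out = hydrants_required_alt hl l
instance (hl : List Int) (l : Int) (out : Int × Int) : Decidable (Spec_hydrants_required hl l out) := by unfold Spec_hydrants_required; infer_instance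

-- ===== CLAIM (what is proved, stated in full; the proofs are below) =====
def Claim_equal_hydrants_required : Prop := ∀ (hl : List Int) (l : Int), Dom_hydrants_required hl l → Pre_hydrants_required hl l → Spec_hydrants_required hl l (hydrants_required hl l)

-- ===== LEMMAS AND PROOFS =====

-- the per-group value B aggregates: max(g) - g[0]
def pvGrpVal (g : List Int) : Int := (PySem.List.max? g (fun y => y)).getD 0 - g.headD 0

-- the aggregate over closed groups gs plus the current group, with a 0 base (harmless: every group value is ≥ 0)
def pvAgg (gs : List (List Int)) (cur : List Int) : Int :=
  ((gs ++ [cur]).map pvGrpVal).foldl max 0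

-- named copies of the two fold bodies (identical to the lambdas in the ports, = rfl)
def pvStepA (l : Int) (s : Int × Int × Int) (h : Int) : Int × Int × Int :=
  if h - s.2.2 < l then (max s.1 (h - s.2.2), s.2.1, s.2.2) else (s.1, s.2.1 + 1, h)

def pvStepB (l : Int) (s : List (List Int) × List Int) (h : Int) : List (List Int) × List Int :=
  if h - s.2.headD 0 ≥ l then (s.1 ++ [s.2], [h]) else (s.1, s.2 ++ [h])

lemma pvGrpVal_cons (c : Int) (t : List Int) :
    pvGrpVal (c :: t) = t.foldl max c - c := by
  simp [pvGrpVal, PySem.List.max?_id_cons]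

lemma le_foldl_max' (c : Int) (t : List Int) : c ≤ t.foldl max c := by
  induction t generalizing c with
  | nil => simp
  | cons a t ih => exact le_trans (le_max_left c a) (ih (max c a))

lemma pvGrpVal_nonneg (c : Int) (t : List Int) : 0 ≤ pvGrpVal (c :: t) := by
  have := le_foldl_max' c t
  rw [pvGrpVal_cons]; omega

lemma pvGrpVal_append (c : Int) (t : List Int) (h : Int) :
    pvGrpVal (c :: (t ++ [h])) = max (pvGrpVal (c :: t)) (h - c) := by
  simp [pvGrpVal_cons, List.foldl_append]
  omega

lemma pvAgg_eq (gs : List (List Int)) (cur : List Int) :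
    pvAgg gs cur = max ((gs.map pvGrpVal).foldl max 0) (pvGrpVal cur) := by
  simp [pvAgg, List.foldl_append]

lemma pvAgg_grow (gs : List (List Int)) (c : Int) (t : List Int) (h : Int) :
    pvAgg gs (c :: (t ++ [h])) = max (pvAgg gs (c :: t)) (h - c) := by
  simp [pvAgg_eq, pvGrpVal_append, max_assoc]

lemma pvAgg_close (gs : List (List Int)) (c : Int) (t : List Int) (h : Int) :
    pvAgg (gs ++ [c :: t]) [h] = pvAgg gs (c :: t) := by
  have h0 : pvGrpVal [h] = 0 := by simp [pvGrpVal_cons]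
  have := pvGrpVal_nonneg c t
  simp [pvAgg_eq, h0, List.foldl_append]
  omega

-- bridging B's max? aggregate (over a list headed by a nonnegative value) to pvAgg's 0-based fold
lemma max?_getD_eq_foldl_zero (v : Int) (t : List Int) (hv : 0 ≤ v) :
    (PySem.List.max? (v :: t) (fun y => y)).getD 0 = (v :: t).foldl max 0 := by
  rw [PySem.List.max?_id_cons]
  simp [max_eq_right hv]

lemma pvStepB_stay (l h c : Int) (gs : List (List Int)) (t : List Int) (hc : h - c < l) :
    pvStepB l (gs, c :: t) h = (gs, c :: (t ++ [h])) := by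
  unfold pvStepB
  rw [if_neg (by simp only [List.headD_cons]; omega)]
  simp

lemma pvStepB_new (l h c : Int) (gs : List (List Int)) (t : List Int) (hc : ¬ h - c < l) :
    pvStepB l (gs, c :: t) h = (gs ++ [c :: t], [h]) := by
  unfold pvStepB
  rw [if_pos (by simp only [List.headD_cons]; omega)]

-- loop invariant: A's fold state is (pvAgg gs cur, |gs| + 1, cur[0]) for B's fold state (gs, cur); cur stays nonempty
lemma pv_loop_inv (l : Int) (rest : List Int) :
    ∀ (gs : List (List Int)) (c : Int) (t : List Int),
    ∃ gs' c' t',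
      rest.foldl (pvStepB l) (gs, c :: t) = (gs', c' :: t') ∧
      rest.foldl (pvStepA l) (pvAgg gs (c :: t), (gs.length : Int) + 1, c)
        = (pvAgg gs' (c' :: t'), (gs'.length : Int) + 1, c') ∧
      (gs = [] → (gs' = [] ∧ c' = c) ∨ (∃ u, gs'.head? = some (c :: u))) ∧
      (∀ u, gs.head? = some u → gs'.head? = some u) := by
  induction rest with
  | nil =>
    intro gs c t
    exact ⟨gs, c, t, rfl, rfl, fun hgs => Or.inl ⟨hgs, rfl⟩, fun u hu => hu⟩
  | cons h rest ih =>
    intro gs c t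
    simp only [List.foldl_cons]
    by_cases hc : h - c < l
    · rw [pvStepB_stay l h c gs t hc]
      rw [show pvStepA l (pvAgg gs (c :: t), (gs.length : Int) + 1, c) h
            = (pvAgg gs (c :: (t ++ [h])), (gs.length : Int) + 1, c) by
          unfold pvStepA; rw [if_pos hc]; simp [pvAgg_grow]]
      exact ih gs c (t ++ [h])
    · rw [pvStepB_new l h c gs t hc]
      rw [show pvStepA l (pvAgg gs (c :: t), (gs.length : Int) + 1, c) h
            = (pvAgg (gs ++ [c :: t]) [h], ((gs ++ [c :: t]).length : Int) + 1, h) by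
          unfold pvStepA; rw [if_neg hc]; simp [pvAgg_close]]
      obtain ⟨gs', c', t', hB, hA, _, hk⟩ := ih (gs ++ [c :: t]) h []
      refine ⟨gs', c', t', hB, hA, ?_, ?_⟩
      · intro hgs
        subst hgs
        exact Or.inr ⟨t, hk (c :: t) (by simp)⟩
      · intro u hu
        apply hk
        cases gs with
        | nil => simp at hu
        | cons g gs0 => simpa using hu

-- ===== VERDICT (by name: the statement is the Claim_ definition above) =====
theorem hydrants_required_spec : Claim_equal_hydrants_required := by
  intro hl l _ hpre
  unfold Spec_hydrants_required
  cases hl with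
  | nil => exact absurd rfl hpre
  | cons c rest =>
    have eA : (fun (s : Int × Int × Int) h =>
        if h - s.2.2 < l then (max s.1 (h - s.2.2), s.2.1, s.2.2)
        else (s.1, s.2.1 + 1, h)) = pvStepA l := rfl
    have eB : (fun (s : List (List Int) × List Int) h =>
        if h - s.2.headD 0 ≥ l then (s.1 ++ [s.2], [h])
        else (s.1, s.2 ++ [h])) = pvStepB l := rfl
    obtain ⟨gs', c', t', hB, hA, hh, _⟩ := pv_loop_inv l rest [] c []
    have h0 : pvAgg ([] : List (List Int)) [c] = 0 := by
      simp [pvAgg, pvGrpVal_cons]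
    simp only [hydrants_required, hydrants_required_alt, eA, eB]
    rw [hB]
    rw [show ((0 : Int), (1 : Int), c)
          = (pvAgg ([] : List (List Int)) [c], (([] : List (List Int)).length : Int) + 1, c) by
        simp [h0]]
    rw [hA]
    rw [show (fun g => (PySem.List.max? g (fun y => y)).getD 0 - g.headD 0) = pvGrpVal from rfl]
    rcases hh rfl with ⟨hgs, _⟩ | ⟨u, hhead⟩
    · subst hgs
      simp only [List.nil_append, List.map_cons, List.map_nil, Prod.mk.injEq]
      refine ⟨by simp, ?_⟩
      rw [max?_getD_eq_foldl_zero _ _ (pvGrpVal_nonneg c' t')]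
      simp [pvAgg]
    · cases gs' with
      | nil => simp at hhead
      | cons g0 grest =>
        simp only [List.head?_cons, Option.some.injEq] at hhead
        subst hhead
        simp only [List.cons_append, List.map_cons, Prod.mk.injEq]
        refine ⟨by simp, ?_⟩
        rw [max?_getD_eq_foldl_zero _ _ (pvGrpVal_nonneg c u)]
        simp [pvAgg]
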